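-- pv_equiv track=rewrite | github.com/leonardoMDA/3-trimestre-py | atividade 6(py)/matrizinverso.py | inverter_diagonal_principal
-- ===== SOURCE A (Python) =====
-- def inverter_diagonal_principal(matriz):
--
--   n = len(matriz)
--   matriz_invertida = [[0 for _ in range(n)] for _ in range(n)]
--
--   for i in range(n):
--     for j in range(i+1, n):
--       matriz_invertida[i][j] = matriz[j][i]
--       matriz_invertida[j][i] = matriz[i][j]
--
--   return matriz_invertida
-- ===== SOURCE B (Python) =====
-- def inverter_diagonal_principal(matriz):
--   n = len(matriz)
--   return [[0 if i == j else matriz[j][i] for j in range(n)] for i in range(n)]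
-- ===== Notes on version B (the rewrite author's own statement) =====
-- stated objective: simpler
-- what changed: B builds each output cell independently with a nested comprehension (result[i][j] = matriz[j][i] off the diagonal, 0 on it), replacing A's mutation of a preallocated zero matrix via an upper-triangle double loop that writes two symmetric cells per step.
import Mathlib
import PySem

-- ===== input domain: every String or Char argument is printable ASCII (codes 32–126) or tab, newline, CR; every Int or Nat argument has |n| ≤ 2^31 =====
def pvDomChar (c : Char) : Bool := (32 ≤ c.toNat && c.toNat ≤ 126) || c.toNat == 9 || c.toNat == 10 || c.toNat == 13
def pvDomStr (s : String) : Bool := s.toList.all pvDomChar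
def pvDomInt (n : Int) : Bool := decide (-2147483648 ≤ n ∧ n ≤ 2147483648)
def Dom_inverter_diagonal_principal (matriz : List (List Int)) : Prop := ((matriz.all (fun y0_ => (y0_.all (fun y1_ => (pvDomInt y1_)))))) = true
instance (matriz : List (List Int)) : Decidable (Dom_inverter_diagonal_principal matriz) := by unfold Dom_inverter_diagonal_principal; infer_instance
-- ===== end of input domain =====

-- B replaces A's in-place upper-triangle double-write loop with a per-cell nested comprehension; objective: simpler.


-- ===== PORT A =====
-- read matriz[r][c] for nonnegative in-range indices (Pre_ guarantees in-range; the 0 default is never hit there)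
def pvRead (m : List (List Int)) (r c : Nat) : Int := (m.getD r []).getD c 0

-- matriz_invertida[i][j] = v  (indices always in range on the n×n accumulator)
def pvSetCell (m : List (List Int)) (i j : Nat) (v : Int) : List (List Int) :=
  m.set i ((m.getD i []).set j v)

def inverter_diagonal_principal (matriz : List (List Int)) : List (List Int) :=
  let n := matriz.length
  let init := List.replicate n (List.replicate n (0 : Int))
  (List.range n).foldl
    (fun acc i =>
      (List.range' (i+1) (n - (i+1))).foldl
        (fun acc2 j =>
          pvSetCell (pvSetCell acc2 i j (pvRead matriz j i)) j i (pvRead matriz i j))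
        acc)
    init

-- ===== PORT B =====
def inverter_diagonal_principal_alt (matriz : List (List Int)) : List (List Int) :=
  let n := matriz.length
  (List.range n).map (fun i =>
    (List.range n).map (fun j => if i = j then 0 else (matriz.getD j []).getD i 0))

-- ===== PRECONDITION & SPEC =====
-- Pre_ excludes exactly the ragged matrices on which A raises IndexError: some read
-- matriz[j][i] with i ≠ j, i,j < n falls off the end of row j.
def Pre_inverter_diagonal_principal (matriz : List (List Int)) : Prop :=
  ∀ i ∈ List.range matriz.length, ∀ j ∈ List.range matriz.length, i ≠ j →
    i < (matriz.getD j []).length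

instance (matriz : List (List Int)) : Decidable (Pre_inverter_diagonal_principal matriz) := by
  unfold Pre_inverter_diagonal_principal; infer_instance

def pvWitness_inverter_diagonal_principal : List (List Int) := [[1, 2], [3, 4]]

def Spec_inverter_diagonal_principal (matriz : List (List Int)) (out : List (List Int)) : Prop := out = inverter_diagonal_principal_alt matriz
instance (matriz : List (List Int)) (out : List (List Int)) : Decidable (Spec_inverter_diagonal_principal matriz out) := by unfold Spec_inverter_diagonal_principal; infer_instance

-- ===== CLAIM (what is proved, stated in full; the proofs are below) =====
def Claim_equal_inverter_diagonal_principal : Prop := ∀ (matriz : List (List Int)), Dom_inverter_diagonal_principal matriz → Pre_inverter_diagonal_principal matriz → Spec_inverter_diagonal_principal matriz (inverter_diagonal_principal matriz)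

-- ===== LEMMAS AND PROOFS =====

-- generic n×n matrix built from an entry function
def pvMk (n : Nat) (f : Nat → Nat → Int) : List (List Int) :=
  (List.range n).map (fun i => (List.range n).map (f i))

theorem pvMk_congr (n : Nat) (f g : Nat → Nat → Int)
    (h : ∀ i j : Nat, i < n → j < n → f i j = g i j) : pvMk n f = pvMk n g := by
  unfold pvMk
  apply List.ext_getElem
  · simp
  · intro i h1 h2
    simp only [List.length_map, List.length_range] at h1
    simp only [List.getElem_map, List.getElem_range]
    apply List.ext_getElem
    · simp
    · intro j h3 h4
      simp only [List.length_map, List.length_range] at h3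
      simp only [List.getElem_map, List.getElem_range]
      exact h i j h1 h3

theorem pvMk_set (n : Nat) (f : Nat → Nat → Int) (r c : Nat) (v : Int)
    (hr : r < n) (_hc : c < n) :
    pvSetCell (pvMk n f) r c v = pvMk n (fun i j => if i = r ∧ j = c then v else f i j) := by
  unfold pvSetCell pvMk
  have hrow : ((List.range n).map (fun i => (List.range n).map (f i))).getD r []
      = (List.range n).map (f r) := by
    rw [List.getD_eq_getElem?_getD]
    simp [hr]
  rw [hrow]
  apply List.ext_getElem
  · simp
  · intro i h1 h2
    simp only [List.length_set, List.length_map, List.length_range] at h1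
    rw [List.getElem_set]
    by_cases hir : r = i
    · rw [if_pos hir]
      subst hir
      simp only [List.getElem_map, List.getElem_range]
      apply List.ext_getElem
      · simp
      · intro j h3 h4
        rw [List.getElem_set]
        simp only [List.getElem_map, List.getElem_range]
        by_cases hjc : c = j
        · subst hjc; simp
        · rw [if_neg hjc, if_neg]
          rintro ⟨_, h⟩
          exact hjc h.symm
    · simp only [if_neg hir, List.getElem_map, List.getElem_range]
      apply List.ext_getElem
      · simp
      · intro j h3 h4
        simp only [List.length_map, List.length_range] at h3
        simp only [List.getElem_map, List.getElem_range]
        rw [if_neg]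
        rintro ⟨h, _⟩
        exact hir h.symm

-- accumulator entry after: all outer rounds < k done, and in round k the inner loop done up to (not incl.) m
def pvEnt (src : List (List Int)) (k m : Nat) (i j : Nat) : Int :=
  if i ≠ j ∧ (min i j < k ∨ (min i j = k ∧ max i j < m)) then (src.getD j []).getD i 0 else 0

theorem pvState_zero (src : List (List Int)) (n : Nat) :
    List.replicate n (List.replicate n (0 : Int)) = pvMk n (pvEnt src 0 1) := by
  apply List.ext_getElem
  · simp [pvMk]
  · intro i h1 h2
    simp only [List.length_replicate] at h1
    simp only [pvMk, List.getElem_map, List.getElem_range, List.getElem_replicate]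
    apply List.ext_getElem
    · simp
    · intro j h3 h4
      simp only [List.length_replicate] at h3
      simp only [List.getElem_map, List.getElem_range, List.getElem_replicate, pvEnt]
      rw [if_neg]
      rintro ⟨hne, h | ⟨hk, hm⟩⟩ <;> omega

theorem pvState_step (src : List (List Int)) (n k m : Nat) (hk : k < m) (hm : m < n) :
    pvSetCell (pvSetCell (pvMk n (pvEnt src k m)) k m (pvRead src m k)) m k (pvRead src k m)
      = pvMk n (pvEnt src k (m+1)) := by
  rw [pvMk_set n _ k m _ (by omega) hm, pvMk_set n _ m k _ hm (by omega)]
  apply pvMk_congr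
  intro i j hi hj
  unfold pvEnt pvRead
  by_cases h1 : i = m ∧ j = k
  · obtain ⟨rfl, rfl⟩ := h1
    rw [if_pos ⟨rfl, rfl⟩, if_pos ⟨by omega, by omega⟩]
  · rw [if_neg h1]
    by_cases h2 : i = k ∧ j = m
    · obtain ⟨rfl, rfl⟩ := h2
      rw [if_pos ⟨rfl, rfl⟩, if_pos ⟨by omega, by omega⟩]
    · rw [if_neg h2]
      by_cases hij : i = j
      · simp [hij]
      · by_cases hc : min i j < k ∨ (min i j = k ∧ max i j < m)
        · rw [if_pos ⟨hij, hc⟩, if_pos ⟨hij, by omega⟩]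
        · rw [if_neg (by tauto), if_neg]
          rintro ⟨_, hc'⟩
          -- min i j = k ∧ max i j < m+1 but not (… < m): forces max i j = m, so {i,j} = {k,m}
          rcases hc' with h | ⟨hmin, hmax⟩
          · exact hc (Or.inl h)
          · have : max i j = m := by omega
            rcases Nat.le_total i j with hle | hle
            · exact h2 ⟨by omega, by omega⟩
            · exact h1 ⟨by omega, by omega⟩

theorem pvInner (src : List (List Int)) (n k : Nat) :
    ∀ (b a : Nat), k < a → a + b ≤ n →
      (List.range' a b).foldl
        (fun acc2 j => pvSetCell (pvSetCell acc2 k j (pvRead src j k)) j k (pvRead src k j))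
        (pvMk n (pvEnt src k a))
      = pvMk n (pvEnt src k (a + b)) := by
  intro b
  induction b with
  | zero => intro a _ _; simp
  | succ b ih =>
    intro a ha hab
    rw [List.range'_succ, List.foldl_cons, pvState_step src n k a ha (by omega)]
    have h : a + (b+1) = (a+1) + b := by omega
    rw [h]
    exact ih (a+1) (by omega) (by omega)

theorem pvOuter (src : List (List Int)) (n : Nat) :
    ∀ k : Nat, k ≤ n →
      (List.range k).foldl
        (fun acc i =>
          (List.range' (i+1) (n - (i+1))).foldl
            (fun acc2 j => pvSetCell (pvSetCell acc2 i j (pvRead src j i)) j i (pvRead src i j))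
            acc)
        (List.replicate n (List.replicate n (0 : Int)))
      = pvMk n (pvEnt src k (k+1)) := by
  intro k
  induction k with
  | zero => intro _; exact pvState_zero src n
  | succ k ih =>
    intro hk
    rw [List.range_succ, List.foldl_append, List.foldl_cons, List.foldl_nil, ih (by omega),
      pvInner src n k (n - (k+1)) (k+1) (by omega) (by omega)]
    apply pvMk_congr
    intro i j hi hj
    unfold pvEnt
    by_cases hij : i = j
    · simp [hij]
    · have h1 : k + 1 + (n - (k+1)) = n := by omega
      rw [h1]
      by_cases hc : min i j < k ∨ (min i j = k ∧ max i j < n)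
      · rw [if_pos ⟨hij, hc⟩, if_pos ⟨hij, by omega⟩]
      · rw [if_neg (by tauto), if_neg]
        rintro ⟨_, hc'⟩
        apply hc
        omega

-- ===== VERDICT (by name: the statement is the Claim_ definition above) =====
theorem inverter_diagonal_principal_spec : Claim_equal_inverter_diagonal_principal := by
  intro matriz _ _
  unfold Spec_inverter_diagonal_principal
  unfold inverter_diagonal_principal inverter_diagonal_principal_alt
  rw [pvOuter matriz matriz.length matriz.length (le_refl _)]
  unfold pvMk pvEnt
  apply List.map_congr_left
  intro i hi
  simp only [List.mem_range] at hi
  apply List.map_congr_left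
  intro j hj
  simp only [List.mem_range] at hj
  by_cases hij : i = j
  · simp [hij]
  · rw [if_pos ⟨hij, by omega⟩, if_neg hij]
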